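-- pv_equiv track=rewrite | github.com/AnthonySalazar09/YachayTechUniversity | Examen Final.py | animo
-- ===== SOURCE A (Python) =====
-- def animo(matriz,palabras):
--     estados = [0 for i in range(len(matriz[0]))]
--     for word in palabras:
--         for i in range(len(matriz)):
--             for j in range(len(matriz[i])):
--                 if matriz[i][j]==word.lower():
--                     estados[j]+=1
--     idx = 0
--     mayor = estados[0]
--     for i in range(len(estados)):
--         if mayor<estados[i]:
--             mayor = estados[i]
--             idx = i
--     return idx
-- ===== SOURCE B (Python) =====
-- def animo(matriz, palabras):
--     cnt = {}
--     for w in palabras: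
--         lw = w.lower()
--         cnt[lw] = cnt.get(lw, 0) + 1
--     estados = [sum(cnt.get(row[j], 0) for row in matriz if j < len(row))
--                for j in range(len(matriz[0]))]
--     return estados.index(max(estados))
-- ===== Notes on version B (the rewrite author's own statement) =====
-- stated objective: faster
-- what changed: B builds a counter of lowered words once, then computes each column total column-major by one comprehension summing counter lookups (instead of A's per-word rescan of the whole matrix with in-place increments), and picks the answer with estados.index(max(estados)) instead of A's manual running-max loop.
import Mathlib
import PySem

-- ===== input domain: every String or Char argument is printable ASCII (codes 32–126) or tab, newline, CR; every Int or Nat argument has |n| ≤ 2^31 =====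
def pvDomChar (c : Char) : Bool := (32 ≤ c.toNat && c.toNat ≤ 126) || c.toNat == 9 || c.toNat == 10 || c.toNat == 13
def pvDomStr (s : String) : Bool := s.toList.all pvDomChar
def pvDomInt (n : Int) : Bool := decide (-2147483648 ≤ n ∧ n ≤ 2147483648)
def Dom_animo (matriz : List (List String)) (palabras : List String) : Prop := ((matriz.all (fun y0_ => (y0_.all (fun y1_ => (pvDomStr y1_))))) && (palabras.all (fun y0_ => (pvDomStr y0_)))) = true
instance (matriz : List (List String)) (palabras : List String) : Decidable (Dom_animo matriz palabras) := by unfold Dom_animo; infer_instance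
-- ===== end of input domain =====

-- B counts the lowered words once and sums column totals column-major by one comprehension,
-- then returns estados.index(max(estados)) (objective: faster, O(M*N + P) instead of O(P*M*N)).

-- ===== PORT A =====
-- inner loop 'for j in range(len(row)): if row[j]==word.lower(): estados[j]+=1'
-- (on Pre_ every matching j is in range, so List.set is Python's estados[j]+=1 exactly)
def animoRowLoop (word : String) (row : List String) (est : List Int) : List Int :=
  (List.range row.length).foldl
    (fun est j => if row.getD j "" = PySem.Str.lower word then est.set j (est.getD j 0 + 1) else est)
    est

def animo (matriz : List (List String)) (palabras : List String) : Int :=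
  let estados : List Int := List.replicate (matriz.headD []).length 0
  let estados := palabras.foldl (fun est word => matriz.foldl (fun est row => animoRowLoop word row est) est) estados
  -- 'idx = 0; mayor = estados[0]; for i in range(len(estados)): if mayor < estados[i]: …'
  (((List.range estados.length).foldl
      (fun (p : Nat × Int) i => if p.2 < estados.getD i 0 then (i, estados.getD i 0) else p)
      (0, estados.getD 0 0)).1 : Int)

-- ===== PORT B =====
-- 'for w in palabras: lw = w.lower(); cnt[lw] = cnt.get(lw, 0) + 1'
def altCounter (palabras : List String) : PySem.Dict String Int :=
  palabras.foldl
    (fun d w => let lw := PySem.Str.lower w; d.insert lw (d.getD lw 0 + 1))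
    PySem.Dict.empty

-- 'estados = [sum(cnt.get(row[j], 0) for row in matriz if j < len(row)) for j in range(len(matriz[0]))]'
-- 'return estados.index(max(estados))'   (none from index?/max? = Python's exception, excluded by Pre_)
def animo_alt (matriz : List (List String)) (palabras : List String) : Int :=
  let cnt := altCounter palabras
  let estados : List Int :=
    (List.range (matriz.headD []).length).map (fun j =>
      ((matriz.filter (fun row => decide (j < row.length))).map
        (fun row => cnt.getD (row.getD j "") 0)).sum)
  let m := (PySem.List.max? estados (fun x => x)).getD 0
  (((PySem.List.index? estados m).getD 0 : Nat) : Int)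

-- ===== PRECONDITION & SPEC =====
-- Pre_ excludes exactly the inputs on which Python A raises: an empty matrix or an empty first
-- row (estados[0] → IndexError), and matrices where some word matches a cell in a column beyond
-- the width of the first row (estados[j] += 1 → IndexError).
def Pre_animo (matriz : List (List String)) (palabras : List String) : Prop :=
  matriz ≠ [] ∧ matriz.headD [] ≠ [] ∧
    ∀ row ∈ matriz, ∀ j < row.length,
      (∃ w ∈ palabras, row.getD j "" = PySem.Str.lower w) → j < (matriz.headD []).length
instance (matriz : List (List String)) (palabras : List String) : Decidable (Pre_animo matriz palabras) := by
  unfold Pre_animo; infer_instance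

def pvWitness_animo : List (List String) × List String :=
  ([["feliz", "triste"], ["triste", "triste"]], ["Triste", "feliz"])

def Spec_animo (matriz : List (List String)) (palabras : List String) (out : Int) : Prop := out = animo_alt matriz palabras
instance (matriz : List (List String)) (palabras : List String) (out : Int) : Decidable (Spec_animo matriz palabras out) := by unfold Spec_animo; infer_instance

-- ===== CLAIM (what is proved, stated in full; the proofs are below) =====
def Claim_equal_animo : Prop := ∀ (matriz : List (List String)) (palabras : List String), Dom_animo matriz palabras → Pre_animo matriz palabras → Spec_animo matriz palabras (animo matriz palabras)

-- ===== LEMMAS AND PROOFS =====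

-- one Python 'estados[j] += d', seen through getD at an arbitrary index k
lemma pv_set_getD (est : List Int) (j k : Nat) (d : Int) :
    (est.set j (est.getD j 0 + d)).getD k 0 =
      est.getD k 0 + if k = j ∧ j < est.length then d else 0 := by
  by_cases hj : j < est.length
  · by_cases hkj : k = j
    · subst hkj
      simp [List.getD_eq_getElem?_getD, hj]
    · simp [List.getD_eq_getElem?_getD, List.getElem?_set_ne (by omega : j ≠ k), hkj]
  · rw [List.set_eq_of_length_le (by omega)]
    simp [hj]

-- a fold of in-place increments keeps the list length
lemma pv_foldl_set_length {α : Type} (l : List α) (f : List Int → α → List Int)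
    (h : ∀ est a, (f est a).length = est.length) :
    ∀ est : List Int, (l.foldl f est).length = est.length := by
  induction l with
  | nil => intro est; rfl
  | cons x t ih => intro est; rw [List.foldl_cons, ih, h]

-- per-cell contribution of one word (A) to column k
def indA (word : String) (row : List String) (k : Nat) : Int :=
  if k < row.length ∧ row.getD k "" = PySem.Str.lower word then 1 else 0

lemma animoRowLoop_length (word : String) (row : List String) (est : List Int) :
    (animoRowLoop word row est).length = est.length := by
  unfold animoRowLoop
  apply pv_foldl_set_length
  intro est a
  split <;> simp

-- generic characterisation of one row pass: a range-fold of guarded increments adds g k at k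
lemma pv_range_incr_getD (P : Nat → Prop) [DecidablePred P] (g : Nat → Int) (n : Nat) :
    ∀ (est : List Int) (k : Nat), k < est.length →
      ((List.range n).foldl (fun est j => if P j then est.set j (est.getD j 0 + g j) else est) est).getD k 0 =
        est.getD k 0 + if k < n ∧ P k then g k else 0 := by
  induction n with
  | zero => intro est k hk; simp
  | succ n ih =>
    intro est k hk
    rw [List.range_succ, List.foldl_append, List.foldl_cons, List.foldl_nil]
    have hlen : ((List.range n).foldl (fun est j => if P j then est.set j (est.getD j 0 + g j) else est) est).length = est.length := by
      apply pv_foldl_set_length; intro est a; split <;> simp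
    by_cases hP : P n
    · rw [if_pos hP, pv_set_getD, ih est k hk, hlen]
      by_cases hkn : k = n
      · subst hkn
        simp [hk, hP]
      · have h2 : ¬ (k = n ∧ n < est.length) := fun hc => hkn hc.1
        rw [if_neg h2, add_zero]
        congr 1
        apply if_congr _ rfl rfl
        constructor <;> rintro ⟨h1', h2'⟩ <;> exact ⟨by omega, h2'⟩
    · rw [if_neg hP, ih est k hk]
      congr 1
      apply if_congr _ rfl rfl
      constructor <;> rintro ⟨h1', h2'⟩
      · exact ⟨by omega, h2'⟩
      · refine ⟨?_, h2'⟩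
        rcases Nat.lt_succ_iff_lt_or_eq.mp h1' with h | h
        · exact h
        · exact absurd (h ▸ h2') hP

lemma animoRowLoop_getD (word : String) (row : List String) (est : List Int) (k : Nat)
    (hk : k < est.length) :
    (animoRowLoop word row est).getD k 0 = est.getD k 0 + indA word row k := by
  unfold animoRowLoop indA
  rw [pv_range_incr_getD (fun j => row.getD j "" = PySem.Str.lower word) (fun _ => 1) row.length est k hk]

-- the matrix pass of A for one word
lemma animoMat_getD (word : String) (matriz : List (List String)) :
    ∀ (est : List Int) (k : Nat), k < est.length →
      (matriz.foldl (fun est row => animoRowLoop word row est) est).getD k 0 =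
        est.getD k 0 + (matriz.map (fun row => indA word row k)).sum := by
  induction matriz with
  | nil => intro est k hk; simp
  | cons r t ih =>
    intro est k hk
    rw [List.foldl_cons, ih _ k (by rw [animoRowLoop_length]; exact hk),
      animoRowLoop_getD word r est k hk]
    simp [add_assoc]

-- the word pass of A
lemma animoWords_getD (palabras : List String) (matriz : List (List String)) :
    ∀ (est : List Int) (k : Nat), k < est.length →
      (palabras.foldl (fun est word => matriz.foldl (fun est row => animoRowLoop word row est) est) est).getD k 0 =
        est.getD k 0 + (palabras.map (fun word => (matriz.map (fun row => indA word row k)).sum)).sum := by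
  induction palabras with
  | nil => intro est k hk; simp
  | cons w t ih =>
    intro est k hk
    rw [List.foldl_cons,
      ih _ k (by rw [pv_foldl_set_length matriz _ (fun est a => animoRowLoop_length w a est)]; exact hk),
      animoMat_getD w matriz est k hk]
    simp [add_assoc]

-- B's counter is Counter(map(str.lower, palabras))
lemma altCounter_eq (palabras : List String) :
    altCounter palabras = PySem.Dict.counter (palabras.map PySem.Str.lower) := by
  unfold altCounter
  rw [← PySem.Dict.foldl_insert_getD_add_one_eq_counter, List.foldl_map]

-- a filtered-map sum is the full-map sum of the guarded summand
lemma pv_filter_map_sum {α : Type} (l : List α) (p : α → Bool) (g : α → Int) :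
    ((l.filter p).map g).sum = (l.map (fun x => if p x then g x else 0)).sum := by
  induction l with
  | nil => rfl
  | cons x t ih =>
    by_cases h : p x = true
    · simp [h, ih]
    · simp [h, ih]

-- pointwise: the column-k contribution of one row is the same for A's sums and B's counter lookup
lemma ind_sum_eq (palabras : List String) (row : List String) (k : Nat) :
    (palabras.map (fun word => indA word row k)).sum =
      if k < row.length then (altCounter palabras).getD (row.getD k "") 0 else 0 := by
  unfold indA
  rw [altCounter_eq]
  by_cases hk : k < row.length
  · simp only [hk, true_and, if_true]
    rw [PySem.Dict.getD_counter]
    have hpt : ∀ w : String, (if row.getD k "" = PySem.Str.lower w then (1 : Int) else 0) =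
        if (PySem.Str.lower w == row.getD k "") = true then 1 else 0 := by
      intro w
      by_cases h : row.getD k "" = PySem.Str.lower w
      · rw [if_pos h, if_pos (by rw [beq_iff_eq]; exact h.symm)]
      · rw [if_neg h, if_neg (by rw [beq_iff_eq]; exact fun hh => h hh.symm)]
    simp only [hpt]
    rw [PySem.List.sum_map_ite_one_zero]
    rw [List.count, List.countP_map]
    rfl
  · rw [if_neg hk]
    apply List.sum_eq_zero
    intro x hx
    simp only [List.mem_map] at hx
    obtain ⟨w, hw, rfl⟩ := hx
    exact if_neg (fun hc => hk hc.1)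

-- swap the two summations (words-outer vs rows-outer)
lemma pv_sum_comm (l1 : List String) (l2 : List (List String)) (f : String → List String → Int) :
    (l1.map (fun a => (l2.map (f a)).sum)).sum = (l2.map (fun b => (l1.map (fun a => f a b)).sum)).sum := by
  induction l1 with
  | nil => simp
  | cons x t ih =>
    simp only [List.map_cons, List.sum_cons, ih]
    rw [PySem.List.sum_map_add_int]

-- A's count vector equals B's column-major count vector
lemma estados_eq (matriz : List (List String)) (palabras : List String) :
    palabras.foldl (fun est word => matriz.foldl (fun est row => animoRowLoop word row est) est)
        (List.replicate (matriz.headD []).length (0 : Int)) =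
      (List.range (matriz.headD []).length).map (fun j =>
        ((matriz.filter (fun row => decide (j < row.length))).map
          (fun row => (altCounter palabras).getD (row.getD j "") 0)).sum) := by
  set cols := (matriz.headD []).length with hcols
  have hlenA : (palabras.foldl (fun est word => matriz.foldl (fun est row => animoRowLoop word row est) est)
      (List.replicate cols (0 : Int))).length = cols := by
    rw [pv_foldl_set_length palabras _ (fun est w =>
      pv_foldl_set_length matriz _ (fun est r => animoRowLoop_length w r est) est)]
    simp
  apply List.ext_getElem (by simp [hlenA])
  intro k h1 h2
  have hk : k < cols := by rw [hlenA] at h1; exact h1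
  have hA := animoWords_getD palabras matriz (List.replicate cols (0 : Int)) k (by simpa using hk)
  rw [List.getD_eq_getElem _ 0 h1] at hA
  rw [hA]
  rw [List.getElem_map, List.getElem_range]
  rw [pv_filter_map_sum]
  rw [pv_sum_comm palabras matriz (fun word row => indA word row k)]
  have hrep : (List.replicate cols (0 : Int)).getD k 0 = 0 := by simp
  rw [hrep, zero_add]
  congr 1
  apply List.map_congr_left
  intro row _
  rw [ind_sum_eq palabras row k]
  by_cases h : k < row.length <;> simp [h]

-- invariant of A's running-max loop: state is (first argmax, max) of the scanned prefix
lemma argfold_inv (l : List Int) (n : Nat) :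
    ((((List.range n).foldl (fun (p : Nat × Int) i => if p.2 < l.getD i 0 then (i, l.getD i 0) else p)
        (0, l.getD 0 0)).2 = l.getD (((List.range n).foldl (fun (p : Nat × Int) i => if p.2 < l.getD i 0 then (i, l.getD i 0) else p) (0, l.getD 0 0)).1) 0) ∧
      ((List.range n).foldl (fun (p : Nat × Int) i => if p.2 < l.getD i 0 then (i, l.getD i 0) else p) (0, l.getD 0 0)).1 < max n 1 ∧
      (∀ j < ((List.range n).foldl (fun (p : Nat × Int) i => if p.2 < l.getD i 0 then (i, l.getD i 0) else p) (0, l.getD 0 0)).1,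
        l.getD j 0 < ((List.range n).foldl (fun (p : Nat × Int) i => if p.2 < l.getD i 0 then (i, l.getD i 0) else p) (0, l.getD 0 0)).2) ∧
      (∀ j < n, l.getD j 0 ≤ ((List.range n).foldl (fun (p : Nat × Int) i => if p.2 < l.getD i 0 then (i, l.getD i 0) else p) (0, l.getD 0 0)).2)) := by
  induction n with
  | zero =>
    exact ⟨rfl, Nat.lt_of_lt_of_le Nat.zero_lt_one (le_max_right 0 1), fun j hj => absurd hj (Nat.not_lt_zero j), fun j hj => absurd hj (Nat.not_lt_zero j)⟩
  | succ n ih =>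
    obtain ⟨ih1, ih2, ih3, ih4⟩ := ih
    rw [List.range_succ, List.foldl_append, List.foldl_cons, List.foldl_nil]
    set r := (List.range n).foldl (fun (p : Nat × Int) i => if p.2 < l.getD i 0 then (i, l.getD i 0) else p) (0, l.getD 0 0) with hr
    by_cases h : r.2 < l.getD n 0
    · rw [if_pos h]
      refine ⟨rfl, by show n < max (n+1) 1; omega, ?_, ?_⟩
      · intro j hj
        exact lt_of_le_of_lt (ih4 j hj) h
      · intro j hj
        rcases Nat.lt_succ_iff_lt_or_eq.mp hj with hj' | hj'
        · exact le_trans (ih4 j hj') (le_of_lt h)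
        · subst hj'; exact le_refl _
    · rw [if_neg h]
      refine ⟨ih1, by omega, ih3, ?_⟩
      intro j hj
      rcases Nat.lt_succ_iff_lt_or_eq.mp hj with hj' | hj'
      · exact ih4 j hj'
      · subst hj'; omega

-- A's running-max loop equals first-index-of-max (B's estados.index(max(estados)))
lemma argfold_eq_index_max (l : List Int) (hl : l ≠ []) :
    (((List.range l.length).foldl (fun (p : Nat × Int) i => if p.2 < l.getD i 0 then (i, l.getD i 0) else p)
        (0, l.getD 0 0)).1 : Int) =
      (((PySem.List.index? l ((PySem.List.max? l (fun x => x)).getD 0)).getD 0 : Nat) : Int) := by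
  obtain ⟨h1, h2, h3, h4⟩ := argfold_inv l l.length
  set r := (List.range l.length).foldl (fun (p : Nat × Int) i => if p.2 < l.getD i 0 then (i, l.getD i 0) else p) (0, l.getD 0 0) with hr
  have hlen : 0 < l.length := List.length_pos_iff.mpr hl
  have hidx : r.1 < l.length := by omega
  obtain ⟨M, hM⟩ : ∃ M, PySem.List.max? l (fun x => x) = some M := by
    cases hM : PySem.List.max? l (fun x => x) with
    | none => exact absurd ((PySem.List.max?_eq_none_iff l (fun x => x)).mp hM) hl
    | some M => exact ⟨M, rfl⟩
  have hMmem : M ∈ l := PySem.List.max?_mem hM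
  have hMub : ∀ y ∈ l, y ≤ M := fun y hy => PySem.List.max?_isMax hM y hy
  -- M = r.2
  have hMr : M = r.2 := by
    have h5 : r.2 ≤ M := by
      rw [h1]
      exact hMub _ (List.getD_eq_getElem l 0 hidx ▸ List.getElem_mem hidx)
    have h6 : M ≤ r.2 := by
      obtain ⟨j, hj, hje⟩ := List.getElem_of_mem hMmem
      have := h4 j hj
      rw [List.getD_eq_getElem l 0 hj, hje] at this
      exact this
    omega
  rw [hM]
  simp only [Option.getD_some]
  have hix : PySem.List.index? l M = some r.1 := by
    rw [PySem.List.index?_eq_some_iff]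
    refine ⟨l.take r.1, l.drop (r.1 + 1), ?_, by simp [hidx.le], ?_⟩
    · conv_lhs => rw [← List.take_append_drop r.1 l]
      congr 1
      rw [← List.getElem_cons_drop hidx]
      congr 1
      rw [hMr, h1, List.getD_eq_getElem l 0 hidx]
    · intro hmem
      obtain ⟨j, hj, hje⟩ := List.getElem_of_mem hmem
      rw [List.length_take] at hj
      have hjr : j < r.1 := by omega
      have := h3 j hjr
      rw [List.getD_eq_getElem l 0 (by omega)] at this
      rw [List.getElem_take] at hje
      rw [hje, hMr] at this
      exact absurd this (lt_irrefl _)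
  rw [hix]
  rfl

-- ===== VERDICT (by name: the statement is the Claim_ definition above) =====
theorem animo_spec : Claim_equal_animo := by
  intro matriz palabras _ hpre
  unfold Spec_animo animo animo_alt
  dsimp only
  rw [estados_eq matriz palabras]
  apply argfold_eq_index_max
  intro hnil
  have := congrArg List.length hnil
  simp at this
  exact hpre.2.1 (by
    cases matriz with
    | nil => exact absurd rfl hpre.1
    | cons r t => simpa [List.length_eq_zero_iff] using this)
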